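-- pv_equiv track=rewrite | github.com/thecodeartificerX/golem-cli | src/golem/worker.py | _strip_section
-- ===== SOURCE A (Python) =====
-- def _strip_section(template: str, heading: str) -> str:
--     """Remove a markdown ## section (heading + body) from the template."""
--     lines = template.splitlines()
--     out: list[str] = []
--     skip = False
--     for line in lines:
--         if line.strip() == heading:
--             skip = True
--             continue
--         if skip and line.startswith("## "):
--             skip = False
--         if not skip:
--             out.append(line)
--     return "\n".join(out)
-- ===== SOURCE B (Python) =====
-- def _strip_section(template: str, heading: str) -> str:
--     """Remove every markdown ## section (heading + body) by locating spans."""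
--     lines = template.splitlines()
--     kept = []
--     i = 0
--     n = len(lines)
--     while i < n:
--         line = lines[i]
--         if line.strip() == heading:
--             # skip the heading, then skip the body up to (not including) the
--             # first '## ' line that is not the heading itself
--             i += 1
--             while i < n and not (lines[i].startswith("## ") and lines[i].strip() != heading):
--                 i += 1
--         else:
--             kept.append(line)
--             i += 1
--     return "\n".join(kept)
-- ===== Notes on version B (the rewrite author's own statement) =====
-- stated objective: alternative
-- what changed: Replaces the skip-flag streaming pass with a locate-span-and-splice decomposition: find a line whose strip() equals the heading, skip forward to the section's terminating '## ' line, and continue from there, accumulating only kept lines.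
import Mathlib
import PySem

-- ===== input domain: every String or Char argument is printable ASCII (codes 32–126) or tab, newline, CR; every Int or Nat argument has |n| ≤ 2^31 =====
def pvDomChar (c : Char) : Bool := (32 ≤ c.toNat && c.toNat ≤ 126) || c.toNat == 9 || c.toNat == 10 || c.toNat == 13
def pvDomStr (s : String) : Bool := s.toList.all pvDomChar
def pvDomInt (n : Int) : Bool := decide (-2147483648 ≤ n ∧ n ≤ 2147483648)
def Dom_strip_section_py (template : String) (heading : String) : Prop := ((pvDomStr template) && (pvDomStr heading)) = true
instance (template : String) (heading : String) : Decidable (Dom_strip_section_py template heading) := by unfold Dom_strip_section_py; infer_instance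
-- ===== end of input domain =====

-- B decomposes the skip-flag pass of A into a locate-span-and-splice scan; objective: alternative structure, same cost.

-- ===== PORT A =====
-- A's loop body as a named step over the state (out, skip)
def stepA (heading : String) (st : List String × Bool) (line : String) : List String × Bool :=
  if PySem.Str.strip line == heading then (st.1, true)
  else
    let skip := if st.2 && PySem.Str.startswith line "## " then false else st.2
    if !skip then (st.1 ++ [line], skip) else (st.1, skip)

def strip_section_py (template : String) (heading : String) : String :=
  PySem.Str.join "\n" ((PySem.Str.splitlines template).foldl (stepA heading) ([], false)).1

-- ===== PORT B =====
-- skip forward to the section-ending '## ' line (or the end)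
def dropSection (heading : String) : List String → List String
  | [] => []
  | l :: rest =>
    if PySem.Str.startswith l "## " && !(PySem.Str.strip l == heading) then l :: rest
    else dropSection heading rest

theorem dropSection_length_le (heading : String) : ∀ ls : List String, (dropSection heading ls).length ≤ ls.length
  | [] => Nat.le_refl _
  | l :: rest => by
    unfold dropSection; split
    · exact Nat.le_refl _
    · exact Nat.le_succ_of_le (dropSection_length_le heading rest)

def keepLines (heading : String) : List String → List String
  | [] => []
  | l :: rest =>
    if PySem.Str.strip l == heading then keepLines heading (dropSection heading rest)
    else l :: keepLines heading rest
termination_by ls => ls.length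
decreasing_by
  · exact Nat.lt_succ_of_le (dropSection_length_le heading rest)
  · simp

def strip_section_py_alt (template : String) (heading : String) : String :=
  PySem.Str.join "\n" (keepLines heading (PySem.Str.splitlines template))

-- ===== PRECONDITION & SPEC =====
def Spec_strip_section_py (template : String) (heading : String) (out : String) : Prop := out = strip_section_py_alt template heading
instance (template : String) (heading : String) (out : String) : Decidable (Spec_strip_section_py template heading out) := by unfold Spec_strip_section_py; infer_instance

-- ===== CLAIM (what is proved, stated in full; the proofs are below) =====
def Claim_equal_strip_section_py : Prop := ∀ (template : String) (heading : String), Dom_strip_section_py template heading → Spec_strip_section_py template heading (strip_section_py template heading)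

-- ===== LEMMAS AND PROOFS =====
theorem key_lemma (heading : String) : ∀ (n : Nat) (ls : List String), ls.length ≤ n →
    (∀ acc, (List.foldl (stepA heading) (acc, true) ls).1 = (List.foldl (stepA heading) (acc, false) (dropSection heading ls)).1)
    ∧ (∀ acc, (List.foldl (stepA heading) (acc, false) ls).1 = acc ++ keepLines heading ls) := by
  intro n
  induction n with
  | zero =>
    intro ls hls
    have : ls = [] := List.eq_nil_of_length_eq_zero (Nat.le_zero.mp hls)
    subst this
    exact ⟨fun acc => rfl, fun acc => by simp [keepLines]⟩
  | succ n ih =>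
    intro ls hls
    cases ls with
    | nil => exact ⟨fun acc => rfl, fun acc => by simp [keepLines]⟩
    | cons l rest =>
      have hr : rest.length ≤ n := Nat.le_of_succ_le_succ hls
      have hdr : (dropSection heading rest).length ≤ n :=
        Nat.le_trans (dropSection_length_le heading rest) hr
      constructor
      · intro acc
        cases hs : (PySem.Str.strip l == heading) with
        | true =>
          simp only [List.foldl_cons, dropSection, hs, Bool.not_true, Bool.and_false,
            Bool.false_eq_true, if_false]
          have h1 : stepA heading (acc, true) l = (acc, true) := by simp [stepA, hs]
          rw [h1]; exact (ih rest hr).1 acc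
        | false =>
          cases hw : PySem.Str.startswith l "## " with
          | true =>
            simp only [List.foldl_cons, dropSection, hs, hw]
            have hw' : PySem.Chars.startswith l.toList ['#', '#', ' '] = true := by
              have e : ("## ").toList = ['#', '#', ' '] := rfl
              simpa [e] using hw
            have h1 : stepA heading (acc, true) l = (acc ++ [l], false) := by
              simp [stepA, hs, hw']
            have h2 : stepA heading (acc, false) l = (acc ++ [l], false) := by
              simp [stepA, hs, hw']
            simp [h1, h2]
          | false =>
            simp only [List.foldl_cons, dropSection, hs, hw]
            have hw' : PySem.Chars.startswith l.toList ['#', '#', ' '] = false := by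
              have e : ("## ").toList = ['#', '#', ' '] := rfl
              simpa [e] using hw
            have h1 : stepA heading (acc, true) l = (acc, true) := by simp [stepA, hs, hw']
            simp only [Bool.false_and, Bool.false_eq_true, if_false, h1]
            exact (ih rest hr).1 acc
      · intro acc
        cases hs : (PySem.Str.strip l == heading) with
        | true =>
          have h1 : stepA heading (acc, false) l = (acc, true) := by simp [stepA, hs]
          rw [List.foldl_cons, h1, (ih rest hr).1 acc,
            (ih (dropSection heading rest) hdr).2 acc, keepLines]
          simp [hs]
        | false =>
          have h1 : stepA heading (acc, false) l = (acc ++ [l], false) := by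
            simp [stepA, hs]
          rw [List.foldl_cons, h1, (ih rest hr).2 (acc ++ [l]), keepLines]
          simp [hs]

-- ===== VERDICT (by name: the statement is the Claim_ definition above) =====
theorem strip_section_py_spec : Claim_equal_strip_section_py := by
  intro template heading _
  unfold Spec_strip_section_py strip_section_py strip_section_py_alt
  rw [(key_lemma heading (PySem.Str.splitlines template).length (PySem.Str.splitlines template) (Nat.le_refl _)).2 []]
  rfl
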